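-- pv_equiv track=rewrite | github.com/landEpita/lerobot-act | lerobot/scripts/add_task_complete_dataset.py | find_task_complete_boundary
-- ===== SOURCE A (Python) =====
-- def find_task_complete_boundary(values, threshold=2000, n_consecutive=3):
--     """Finds the boundary index using n_consecutive big jumps"""
--     count = 0
--     found_big = False
--     boundary_idx = len(values)
--     for i in range(len(values) - 2, -1, -1):
--         delta = values[i] - values[i + 1]
--         if delta > threshold:
--             count += 1
--             if count == n_consecutive:
--                 found_big = True
--         else:
--             if found_big:
--                 boundary_idx = i + n_consecutive  # the flip occurs at the end of the streak
--                 break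
--             count = 0  # reset the count if streak is broken
--     return boundary_idx
-- ===== SOURCE B (Python) =====
-- def find_task_complete_boundary(values, threshold=2000, n_consecutive=3):
--     """Finds the boundary index using n_consecutive big jumps"""
--     big = [a - b > threshold for a, b in zip(values, values[1:])]
--     for s in range(len(big) - n_consecutive - 1, -1, -1):
--         if not big[s] and all(big[s + 1 : s + 1 + n_consecutive]):
--             return s + n_consecutive
--     return len(values)
-- ===== Notes on version B (the rewrite author's own statement) =====
-- stated objective: simpler
-- what changed: B precomputes the boolean mask of big backward deltas and scans it from the top for the highest break index s whose next n_consecutive mask entries are all big, replacing A's mutable streak-counter/found-flag state machine.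
-- outside the precondition, e.g. on find_task_complete_boundary([0, 5, 0], 0, 0): A returns 3, B returns 0
import Mathlib
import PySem

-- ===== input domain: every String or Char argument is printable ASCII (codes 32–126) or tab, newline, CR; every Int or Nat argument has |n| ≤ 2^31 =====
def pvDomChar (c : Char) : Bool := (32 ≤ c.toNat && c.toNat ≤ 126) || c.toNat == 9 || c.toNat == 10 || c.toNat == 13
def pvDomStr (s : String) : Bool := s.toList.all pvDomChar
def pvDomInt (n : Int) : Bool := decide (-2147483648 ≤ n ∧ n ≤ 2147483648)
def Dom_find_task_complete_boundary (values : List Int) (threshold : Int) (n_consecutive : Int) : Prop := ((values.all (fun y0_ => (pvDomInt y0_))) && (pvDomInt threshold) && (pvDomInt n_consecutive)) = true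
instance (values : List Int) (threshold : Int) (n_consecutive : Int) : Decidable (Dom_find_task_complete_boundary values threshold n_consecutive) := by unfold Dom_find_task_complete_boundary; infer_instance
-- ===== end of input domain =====

-- B replaces A's mutable streak-counter/found-flag state machine by a precomputed mask of big
-- backward deltas plus a top-down window scan (objective: simpler; not faster).


-- ===== PORT A =====
-- A's descending for-loop 'for i in range(len(values)-2, -1, -1)' as structural recursion on i.
-- values[i] and values[i+1] are always in range there (i ≤ len-2), so List.getD is exact.
def loopA (v : List Int) (t n bnd : Int) : Nat → Int → Bool → Int
  | 0, _count, found =>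
      if v.getD 0 0 - v.getD 1 0 > t then bnd
      else if found then 0 + n else bnd
  | i+1, count, found =>
      if v.getD (i+1) 0 - v.getD (i+2) 0 > t then
        loopA v t n bnd i (count + 1) (if count + 1 = n then true else found)
      else
        if found then ((i : Int) + 1) + n
        else loopA v t n bnd i 0 found

def find_task_complete_boundary (values : List Int) (threshold : Int) (n_consecutive : Int) : Int :=
  if 2 ≤ values.length then
    loopA values threshold n_consecutive (values.length : Int) (values.length - 2) 0 false
  else (values.length : Int)

-- ===== PORT B =====
-- big = [a - b > threshold for a, b in zip(values, values[1:])]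
def bigMask (values : List Int) (threshold : Int) : List Bool :=
  (values.zip values.tail).map (fun p => decide (p.1 - p.2 > threshold))

-- not big[s] and all(big[s+1 : s+1+n_consecutive])   (big[s] always in range on the loop's range)
def condB (big : List Bool) (n : Int) (s : Nat) : Bool :=
  !big.getD s false && (PySem.List.slice big (some ((s : Int) + 1)) (some ((s : Int) + 1 + n))).all id

-- for s in range(len(big) - n_consecutive - 1, -1, -1): if cond: return s + n_consecutive
def loopB (big : List Bool) (n len : Int) : Nat → Int
  | 0 => if condB big n 0 then 0 + n else len
  | s+1 => if condB big n (s+1) then ((s : Int) + 1) + n else loopB big n len s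

def find_task_complete_boundary_alt (values : List Int) (threshold : Int) (n_consecutive : Int) : Int :=
  let big := bigMask values threshold
  let start : Int := (big.length : Int) - n_consecutive - 1
  if start < 0 then (values.length : Int)
  else loopB big n_consecutive (values.length : Int) start.toNat

-- ===== PRECONDITION & SPEC =====
-- Pre_ restricts to the natural domain n_consecutive ≥ 1: for nonpositive n_consecutive A's streak
-- counter (which only takes values ≥ 1 when tested) can never equal it, so A degenerately returns
-- len(values); B treats the empty window as satisfied there.
def Pre_find_task_complete_boundary (values : List Int) (threshold : Int) (n_consecutive : Int) : Prop :=
  1 ≤ n_consecutive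
instance (values : List Int) (threshold : Int) (n_consecutive : Int) : Decidable (Pre_find_task_complete_boundary values threshold n_consecutive) := by unfold Pre_find_task_complete_boundary; infer_instance

def pvWitness_find_task_complete_boundary : List Int × Int × Int := ([0, 9, 0, 0], 2, 1)

def Spec_find_task_complete_boundary (values : List Int) (threshold : Int) (n_consecutive : Int) (out : Int) : Prop := out = find_task_complete_boundary_alt values threshold n_consecutive
instance (values : List Int) (threshold : Int) (n_consecutive : Int) (out : Int) : Decidable (Spec_find_task_complete_boundary values threshold n_consecutive out) := by unfold Spec_find_task_complete_boundary; infer_instance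

-- ===== CLAIM (what is proved, stated in full; the proofs are below) =====
def Claim_equal_find_task_complete_boundary : Prop := ∀ (values : List Int) (threshold : Int) (n_consecutive : Int), Dom_find_task_complete_boundary values threshold n_consecutive → Pre_find_task_complete_boundary values threshold n_consecutive → Spec_find_task_complete_boundary values threshold n_consecutive (find_task_complete_boundary values threshold n_consecutive)

-- ===== LEMMAS AND PROOFS =====

-- Proof-side search: same descending scan as loopB but with an explicit full-window condition
-- (length guard + pointwise window), convenient for the invariant proof about loopA.
def Qb (big : List Bool) (n : Int) (s : Nat) : Bool :=
  !big.getD s false && decide (s + 1 + n.toNat ≤ big.length)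
    && (List.range n.toNat).all (fun j => big.getD (s + 1 + j) false)

def srch (big : List Bool) (n len : Int) : Nat → Int
  | 0 => if Qb big n 0 then 0 + n else len
  | s+1 => if Qb big n (s+1) then ((s : Int) + 1) + n else srch big n len s

theorem bigMask_length (v : List Int) (t : Int) : (bigMask v t).length = v.length - 1 := by
  simp [bigMask]

theorem bigMask_getD (v : List Int) (t : Int) (i : Nat) (h : i + 1 < v.length) :
    (bigMask v t).getD i false = decide (v.getD i 0 - v.getD (i+1) 0 > t) := by
  have hl : i < (bigMask v t).length := by rw [bigMask_length]; omega
  have h0 : i < v.length := by omega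
  have h1 : i + 1 < v.length := h
  rw [List.getD_eq_getElem _ _ hl, List.getD_eq_getElem _ _ h0, List.getD_eq_getElem _ _ h1]
  simp [bigMask]

theorem Qb_false_of_short (big : List Bool) (n : Int) (hn : 1 ≤ n) (s : Nat)
    (h : ¬ ((s : Int) + 1 + n ≤ big.length)) : Qb big n s = false := by
  have : ¬ (s + 1 + n.toNat ≤ big.length) := by omega
  simp [Qb, this]

theorem srch_skip (big : List Bool) (n len : Int) :
    ∀ i k : Nat, k ≤ i → (∀ s, k < s → s ≤ i → Qb big n s = false) →
      srch big n len i = srch big n len k := by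
  intro i
  induction i with
  | zero => intro k hk _; have hk0 : k = 0 := Nat.le_zero.mp hk; rw [hk0]
  | succ i ih =>
      intro k hk hq
      rcases Nat.eq_or_lt_of_le hk with h | h
      · rw [h]
      · have hqi : Qb big n (i+1) = false := hq _ (by omega) (by omega)
        rw [srch, hqi]
        simp only [Bool.false_eq_true, if_false]
        exact ih k (by omega) (fun s h1 h2 => hq s h1 (by omega))

theorem srch_none (big : List Bool) (n len : Int) :
    ∀ i : Nat, (∀ s, s ≤ i → Qb big n s = false) → srch big n len i = len := by
  intro i
  induction i with
  | zero => intro h; simp [srch, h 0 (le_refl 0)]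
  | succ i ih =>
      intro h
      rw [srch, h (i+1) (le_refl _)]
      simp only [Bool.false_eq_true, if_false]
      exact ih (fun s hs => h s (by omega))

theorem condB_eq_Qb (big : List Bool) (n : Int) (hn : 1 ≤ n) (s : Nat)
    (h : (s : Int) + 1 + n ≤ big.length) : condB big n s = Qb big n s := by
  have hnn : n.toNat = n := Int.toNat_of_nonneg (by omega)
  have hlen : s + 1 + n.toNat ≤ big.length := by omega
  have ha : (0 : Int) ≤ (s : Int) + 1 := by omega
  have hb : (0 : Int) ≤ (s : Int) + 1 + n := by omega
  have hs : PySem.List.slice big (some ((s : Int) + 1)) (some ((s : Int) + 1 + n))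
      = (big.drop (s+1)).take n.toNat := by
    rw [PySem.List.slice_toNat big ha hb]
    congr 1 <;> omega
  rw [condB, Qb, hs]
  have hdec : decide (s + 1 + n.toNat ≤ big.length) = true := by simp [hlen]
  rw [hdec, Bool.and_true]
  congr 1
  rw [Bool.eq_iff_iff, List.all_eq_true, List.all_eq_true]
  constructor
  · intro hall j hj
    simp only [List.mem_range] at hj
    have hidx : s + 1 + j < big.length := by omega
    have hmem : big[s+1+j] ∈ (big.drop (s+1)).take n.toNat := by
      rw [List.mem_iff_getElem]
      refine ⟨j, by simp; omega, ?_⟩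
      rw [List.getElem_take, List.getElem_drop]
    have := hall _ hmem
    rw [List.getD_eq_getElem _ _ hidx]
    exact this
  · intro hall x hx
    rw [List.mem_iff_getElem] at hx
    obtain ⟨j, hj, hxe⟩ := hx
    have hj' : j < n.toNat := by simp at hj; omega
    have hidx : s + 1 + j < big.length := by omega
    have := hall j (List.mem_range.mpr hj')
    rw [List.getD_eq_getElem _ _ hidx] at this
    rw [← hxe, List.getElem_take, List.getElem_drop]
    exact this

theorem loopB_eq_srch (big : List Bool) (n len : Int) (hn : 1 ≤ n) :
    ∀ s : Nat, (s : Int) + 1 + n ≤ big.length → loopB big n len s = srch big n len s := by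
  intro s
  induction s with
  | zero => intro h; rw [loopB, srch, condB_eq_Qb big n hn 0 (by push_cast; omega)]
  | succ s ih =>
      intro h
      rw [loopB, srch, condB_eq_Qb big n hn (s+1) (by push_cast at h ⊢; omega)]
      rcases hQ : Qb big n (s+1) with _ | _
      · simp only [Bool.false_eq_true, if_false]
        exact ih (by push_cast at h ⊢; omega)
      · simp

theorem loopA_eq_srch (v : List Int) (t n : Int) (hn : 1 ≤ n) :
    ∀ (i : Nat) (c : Int) (f : Bool),
      i < (bigMask v t).length →
      0 ≤ c →
      f = decide (n ≤ c) →
      (i : Int) + c ≤ (bigMask v t).length - 1 →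
      (∀ j : Nat, i < j → (j : Int) ≤ (i : Int) + c → (bigMask v t).getD j false = true) →
      ((i : Int) + c = (bigMask v t).length - 1 ∨ (bigMask v t).getD (i + c.toNat + 1) false = false) →
      (∀ s : Nat, i < s → s < (bigMask v t).length → Qb (bigMask v t) n s = false) →
      loopA v t n (v.length : Int) i c f = srch (bigMask v t) n (v.length : Int) i := by
  have hmlen := bigMask_length v t
  have hmget := bigMask_getD v t
  generalize hbig : bigMask v t = big at hmlen hmget ⊢
  intro i
  induction i with
  | zero =>
      intro c f hiL hc hf hcap hstreak hmax _hQ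
      have hL1 : 0 + 1 < v.length := by omega
      have hm : big.getD 0 false = decide (v.getD 0 0 - v.getD 1 0 > t) := hmget 0 hL1
      rw [loopA, srch]
      rcases hb : big.getD 0 false with _ | _
      · -- big[0] = false : delta ≤ t
        have hdelta : ¬ (v.getD 0 0 - v.getD 1 0 > t) := by
          rw [hb] at hm; simpa using hm.symm
        rw [if_neg hdelta]
        rcases hfv : f with _ | _
        · -- not found: Qb 0 must be false
          have hcn : ¬ (n ≤ c) := by rw [hfv] at hf; simpa using hf.symm
          have hQ0 : Qb big n 0 = false := by
            rcases hmax with hm1 | hm2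
            · -- streak reaches the top: window longer than the array
              exact Qb_false_of_short big n hn 0 (by omega)
            · -- big[c+1] = false lies inside the window
              have hfj : big.getD (0 + 1 + c.toNat) false = false := by
                have he : 0 + 1 + c.toNat = 0 + c.toNat + 1 := by omega
                rw [he]; exact hm2
              rw [Qb, hb]
              simp only [Bool.not_false, Bool.true_and]
              apply Bool.and_eq_false_iff.mpr
              right
              apply List.all_eq_false.mpr
              exact ⟨c.toNat, List.mem_range.mpr (by omega), by simpa using hfj⟩
          rw [hQ0]
        · -- found: Qb 0 is true, both return 0 + n
          have hcn : n ≤ c := by rw [hfv] at hf; simpa using hf.symm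
          have hQ0 : Qb big n 0 = true := by
            rw [Qb, hb]
            have h1 : 0 + 1 + n.toNat ≤ big.length := by omega
            have h2 : (List.range n.toNat).all (fun j => big.getD (0 + 1 + j) false) = true := by
              rw [List.all_eq_true]
              intro j hj
              rw [List.mem_range] at hj
              exact hstreak (0 + 1 + j) (by omega) (by push_cast; omega)
            simp only [Bool.not_false, Bool.true_and, Bool.and_eq_true, decide_eq_true_eq]
            exact ⟨h1, h2⟩
          rw [hQ0]
      · -- big[0] = true : delta > t; loop ends, srch misses
        have hdelta : v.getD 0 0 - v.getD 1 0 > t := by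
          rw [hb] at hm; simpa using hm.symm
        rw [if_pos hdelta]
        have hQ0 : Qb big n 0 = false := by rw [Qb, hb]; simp
        rw [hQ0]; simp
  | succ i ih =>
      intro c f hiL hc hf hcap hstreak hmax hQ
      have hL1 : (i + 1) + 1 < v.length := by omega
      have hm : big.getD (i+1) false = decide (v.getD (i+1) 0 - v.getD (i+2) 0 > t) :=
        hmget (i+1) hL1
      rw [loopA, srch]
      rcases hb : big.getD (i+1) false with _ | _
      · -- big[i+1] = false
        have hdelta : ¬ (v.getD (i+1) 0 - v.getD (i+2) 0 > t) := by
          rw [hb] at hm; simpa using hm.symm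
        rw [if_neg hdelta]
        rcases hfv : f with _ | _
        · -- not found: reset count to 0, recurse; Qb (i+1) = false
          have hcn : ¬ (n ≤ c) := by rw [hfv] at hf; simpa using hf.symm
          have hQi : Qb big n (i+1) = false := by
            rcases hmax with hm1 | hm2
            · exact Qb_false_of_short big n hn (i+1) (by push_cast; push_cast at hm1; omega)
            · have hfj : big.getD ((i+1) + 1 + c.toNat) false = false := by
                have he : (i+1) + 1 + c.toNat = (i+1) + c.toNat + 1 := by omega
                rw [he]; exact hm2
              rw [Qb, hb]
              simp only [Bool.not_false, Bool.true_and]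
              apply Bool.and_eq_false_iff.mpr
              right
              apply List.all_eq_false.mpr
              exact ⟨c.toNat, List.mem_range.mpr (by omega), by simpa using hfj⟩
          rw [hQi]
          simp only [Bool.false_eq_true, if_false]
          apply ih 0 false (by omega) (by omega) (by simp; omega) (by push_cast; push_cast at hcap; omega)
          · intro j h1 h2; omega
          · right; simpa using hb
          · intro s h1 h2
            rcases Nat.eq_or_lt_of_le (Nat.succ_le_of_lt h1) with he | hlt
            · rw [← he]; exact hQi
            · exact hQ s (by omega) h2
        · -- found: return (i+1) + n; Qb (i+1) = true
          have hcn : n ≤ c := by rw [hfv] at hf; simpa using hf.symm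
          have hQi : Qb big n (i+1) = true := by
            rw [Qb, hb]
            have h1 : (i+1) + 1 + n.toNat ≤ big.length := by push_cast at hcap; omega
            have h2 : (List.range n.toNat).all (fun j => big.getD ((i+1) + 1 + j) false) = true := by
              rw [List.all_eq_true]
              intro j hj
              rw [List.mem_range] at hj
              exact hstreak ((i+1) + 1 + j) (by omega) (by push_cast; omega)
            simp only [Bool.not_false, Bool.true_and, Bool.and_eq_true, decide_eq_true_eq]
            exact ⟨h1, h2⟩
          rw [hQi]
          simp only [if_true]
      · -- big[i+1] = true : extend streak, recurse; Qb (i+1) = false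
        have hdelta : v.getD (i+1) 0 - v.getD (i+2) 0 > t := by
          rw [hb] at hm; simpa using hm.symm
        rw [if_pos hdelta]
        have hQi : Qb big n (i+1) = false := by rw [Qb, hb]; simp
        rw [hQi]
        simp only [Bool.false_eq_true, if_false]
        apply ih (c + 1) _ (by omega) (by omega) ?_ (by push_cast; push_cast at hcap; omega)
        · intro j h1 h2
          rcases Nat.eq_or_lt_of_le (Nat.succ_le_of_lt h1) with he | hlt
          · rw [← he]; exact hb
          · exact hstreak j (by omega) (by push_cast; push_cast at h2; omega)
        · rcases hmax with hm1 | hm2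
          · left; push_cast; push_cast at hm1; omega
          · right
            have : i + (c + 1).toNat + 1 = (i + 1) + c.toNat + 1 := by omega
            rw [this]; exact hm2
        · intro s h1 h2
          rcases Nat.eq_or_lt_of_le (Nat.succ_le_of_lt h1) with he | hlt
          · rw [← he, Qb, hb]; simp
          · exact hQ s (by omega) h2
        · -- new flag invariant: (if c+1 = n then true else f) = decide (n ≤ c+1)
          rcases hcc : decide (c + 1 = n) with _ | _
          · simp at hcc
            rw [if_neg hcc, hf]
            simp only [decide_eq_decide]
            omega
          · simp at hcc
            rw [if_pos hcc]
            have : n ≤ c + 1 := by omega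
            simp [this]

-- ===== VERDICT (by name: the statement is the Claim_ definition above) =====
theorem find_task_complete_boundary_spec : Claim_equal_find_task_complete_boundary := by
  intro values threshold n _hDom hPre
  unfold Spec_find_task_complete_boundary
  have hn : 1 ≤ n := hPre
  rw [find_task_complete_boundary, find_task_complete_boundary_alt]
  have hA := loopA_eq_srch values threshold n hn
  have hL := bigMask_length values threshold
  generalize hbig : bigMask values threshold = big at hA hL ⊢
  by_cases h2 : 2 ≤ values.length
  · rw [if_pos h2]
    have he : values.length - 2 = big.length - 1 := by omega
    rw [he, hA (big.length - 1) 0 false (by omega) (by omega) (by simp; omega)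
        (by push_cast; omega)
        (by intro j h1 h2; exfalso; push_cast at h2; omega)
        (Or.inl (by push_cast; omega))
        (by intro s h1 h2; exfalso; omega)]
    by_cases hst : (big.length : Int) - n - 1 < 0
    · rw [if_pos hst]
      apply srch_none
      intro s _
      apply Qb_false_of_short big n hn
      omega
    · rw [if_neg hst]
      rw [loopB_eq_srch big n (values.length : Int) hn _ (by omega)]
      apply srch_skip
      · omega
      · intro s h1 h2
        apply Qb_false_of_short big n hn
        omega
  · rw [if_neg h2]
    have hst : (big.length : Int) - n - 1 < 0 := by omega
    rw [if_pos hst]
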